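-- pv_equiv track=rewrite | github.com/uglydavy/SciTrans-LLMs | scitrans_lm/refine/rerank.py | _glossary_hits
-- ===== SOURCE A (Python) =====
-- from typing import Dict, Iterable, List, Tuple
--
-- def _glossary_hits(text: str, glossary: Dict[str, str]) -> int:
--     if not glossary:
--         return 0
--     hits = 0
--     lowered = text.lower()
--     for src in glossary:
--         if src in lowered:
--             hits += 1
--     return hits
-- ===== SOURCE B (Python) =====
-- def _glossary_hits(text, glossary):
--     # Bucket the distinct keys by length; for each length intersect with the
--     # set of all substrings of that length of the lowered text.
--     lowered = text.lower()
--     by_len = {}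
--     for k in set(glossary):
--         by_len.setdefault(len(k), set()).add(k)
--     hits = 0
--     for length, keys in by_len.items():
--         subs = {lowered[i:i + length] for i in range(len(lowered) - length + 1)}
--         hits += len(keys & subs)
--     return hits
-- ===== Notes on version B (the rewrite author's own statement) =====
-- stated objective: faster
-- what changed: A runs one substring search over the lowered text per glossary key; B buckets the distinct keys by length and, per length L, builds the set of all length-L substrings of the lowered text once and counts the bucket-set intersection.
import Mathlib
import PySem

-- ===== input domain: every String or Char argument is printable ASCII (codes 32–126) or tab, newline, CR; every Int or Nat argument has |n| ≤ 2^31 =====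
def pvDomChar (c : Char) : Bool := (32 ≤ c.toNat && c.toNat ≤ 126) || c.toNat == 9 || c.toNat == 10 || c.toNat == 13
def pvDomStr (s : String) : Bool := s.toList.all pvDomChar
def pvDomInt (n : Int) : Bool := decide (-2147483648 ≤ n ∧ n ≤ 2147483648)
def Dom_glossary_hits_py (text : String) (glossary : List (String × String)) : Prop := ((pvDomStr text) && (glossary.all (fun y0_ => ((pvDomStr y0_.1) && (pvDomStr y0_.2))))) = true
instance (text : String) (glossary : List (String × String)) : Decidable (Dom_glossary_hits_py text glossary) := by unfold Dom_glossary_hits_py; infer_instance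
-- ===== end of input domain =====

-- B replaces A's per-key substring search by bucketing the distinct keys by length and
-- intersecting each bucket with the set of all substrings of that length of the lowered text.


-- ===== PORT A =====
-- 'for src in glossary' iterates the dict's keys: first occurrences, in order (PySem.List.dedup).
def glossary_hits_py (text : String) (glossary : List (String × String)) : Int :=
  if glossary = [] then 0
  else
    let lowered := PySem.Str.lower text
    (PySem.List.dedup (glossary.map Prod.fst)).foldl
      (fun hits src => if PySem.Str.isIn src lowered then hits + 1 else hits) 0

-- ===== PORT B =====
-- 'by_len.setdefault(len(k), set()).add(k)' is Dict.modify at key len(k) with default set();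
-- the result (a sum over the buckets) does not depend on the hash iteration order of set(glossary).
def glossary_hits_py_alt (text : String) (glossary : List (String × String)) : Int :=
  let lowered := PySem.Str.lower text
  let byLen : PySem.Dict Int (List String) :=
    (PySem.Set.ofList (glossary.map Prod.fst)).foldl
      (fun d k => d.modify (PySem.Str.len k) [] (fun s => PySem.Set.add s k))
      PySem.Dict.empty
  byLen.items.foldl
    (fun hits it =>
      let subs := PySem.Set.ofList
        ((PySem.List.pyRange 0 (PySem.Str.len lowered - it.1 + 1) 1).map
          (fun i => PySem.Str.slice lowered (some i) (some (i + it.1))))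
      hits + ((PySem.Set.inter it.2 subs).length : Int))
    0

-- ===== PRECONDITION & SPEC =====
def Spec_glossary_hits_py (text : String) (glossary : List (String × String)) (out : Int) : Prop := out = glossary_hits_py_alt text glossary
instance (text : String) (glossary : List (String × String)) (out : Int) : Decidable (Spec_glossary_hits_py text glossary out) := by unfold Spec_glossary_hits_py; infer_instance

-- ===== CLAIM (what is proved, stated in full; the proofs are below) =====
def Claim_equal_glossary_hits_py : Prop := ∀ (text : String) (glossary : List (String × String)), Dom_glossary_hits_py text glossary → Spec_glossary_hits_py text glossary (glossary_hits_py text glossary)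

-- ===== LEMMAS AND PROOFS =====

-- the grouping fold: the bucket at L collects, in order, the keys whose f-value is L
lemma getD_group (f : String → Int) (xs : List String) (d : PySem.Dict Int (List String)) (L : Int)
    (hx : ∀ k ∈ xs, k ∉ d.getD (f k) []) (hnd : xs.Nodup) :
    (xs.foldl (fun d k => d.modify (f k) [] (fun s => PySem.Set.add s k)) d).getD L []
      = d.getD L [] ++ xs.filter (fun k => f k == L) := by
  induction xs generalizing d with
  | nil => simp
  | cons x xs ih =>
    have hxd : x ∉ d.getD (f x) [] := hx x (by simp)
    have hadd : PySem.Set.add (d.getD (f x) []) x = d.getD (f x) [] ++ [x] := by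
      simp only [PySem.Set.add, PySem.Set.contains, List.contains_eq_mem]
      simp [hxd]
    have hx' : ∀ k ∈ xs, k ∉ (d.modify (f x) [] (fun s => PySem.Set.add s x)).getD (f k) [] := by
      intro k hk
      rw [PySem.Dict.getD_modify]
      split_ifs with he
      · rw [hadd]
        have hkx : k ≠ x := by
          intro h; exact (List.nodup_cons.mp hnd).1 (h ▸ hk)
        simp only [List.mem_append, List.mem_singleton, not_or]
        exact ⟨fun h => (he ▸ hx k (by simp [hk])) h, hkx⟩
      · exact hx k (by simp [hk])
    rw [List.foldl_cons, ih _ hx' (List.nodup_cons.mp hnd).2]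
    rw [PySem.Dict.getD_modify, List.filter_cons]
    by_cases he : L = f x
    · subst he
      rw [if_pos rfl, hadd]
      simp
    · rw [if_neg he]
      have hb : ¬ (f x == L) = true := by
        simp only [beq_iff_eq]; exact fun h => he h.symm
      simp [hb]

-- a key is among the slices of its own length iff it occurs as a substring
lemma mem_slices_iff (low k : String) :
    k ∈ (PySem.List.pyRange 0 (PySem.Str.len low - PySem.Str.len k + 1) 1).map
          (fun i => PySem.Str.slice low (some i) (some (i + PySem.Str.len k)))
      ↔ PySem.Chars.isIn k.toList low.toList = true := by
  have hlenk : PySem.Str.len k = (k.toList.length : Int) := PySem.Str.len_eq k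
  have hlenl : PySem.Str.len low = (low.toList.length : Int) := PySem.Str.len_eq low
  rw [← PySem.Chars.exists_prefix_drop_iff_isIn, List.mem_map]
  constructor
  · rintro ⟨i, hi, hk⟩
    rw [PySem.List.mem_pyRange_one] at hi
    refine ⟨i.toNat, ?_⟩
    have h1 : (PySem.Str.slice low (some i) (some (i + PySem.Str.len k))).toList
        = List.take ((i + PySem.Str.len k).toNat - i.toNat) (List.drop i.toNat low.toList) := by
      simp only [PySem.Str.toList_slice, PySem.Chars.slice_eq_listSlice]
      exact PySem.List.slice_toNat _ hi.1 (by omega)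
    have hlen : (i + PySem.Str.len k).toNat - i.toNat = k.toList.length := by omega
    have hk' : k.toList = List.take k.toList.length (List.drop i.toNat low.toList) := by
      conv_lhs => rw [← hk, h1]
      rw [hlen]
    exact List.prefix_iff_eq_take.mpr hk'
  · rintro ⟨j, hj⟩
    have hple : k.toList.length ≤ low.toList.length - j := by
      simpa using hj.length_le
    have hjlen : j + k.toList.length ≤ low.toList.length ∨ k.toList = [] := by
      by_cases hk0 : k.toList = []
      · right; exact hk0
      · left
        have : 0 < k.toList.length := List.length_pos_iff.mpr hk0
        omega
    have hdrop : ∃ j' : Nat, j' + k.toList.length ≤ low.toList.length ∧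
        k.toList <+: List.drop j' low.toList := by
      rcases hjlen with h | h
      · exact ⟨j, h, hj⟩
      · exact ⟨0, by rw [h]; simp, by rw [h]; exact List.nil_prefix⟩
    obtain ⟨j', hle, hpre⟩ := hdrop
    refine ⟨(j' : Int), ?_, ?_⟩
    · rw [PySem.List.mem_pyRange_one]
      constructor
      · positivity
      · rw [hlenk, hlenl]; omega
    · apply String.toList_inj.mp
      simp only [PySem.Str.toList_slice, PySem.Chars.slice_eq_listSlice]
      rw [PySem.List.slice_toNat _ (by positivity) (by rw [hlenk]; positivity)]
      have ht : ((j' : Int) + PySem.Str.len k).toNat - ((j' : Int)).toNat = k.toList.length := by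
        rw [hlenk]; omega
      rw [ht, Int.toNat_natCast]
      exact (List.prefix_iff_eq_take.mp hpre).symm

-- summing the bucket counts over the distinct f-values counts each key once
lemma sum_partition (xs : List String) (Ls : List Int) (q : String → Bool)
    (f : String → Int) (hnd : Ls.Nodup) (hcov : ∀ k ∈ xs, f k ∈ Ls) :
    (Ls.map (fun L => ((xs.filter (fun k => f k == L)).filter q).length)).sum
      = (xs.filter q).length := by
  induction xs with
  | nil => simp
  | cons x xs ih =>
    have hcov' : ∀ k ∈ xs, f k ∈ Ls := fun k hk => hcov k (by simp [hk])
    rcases hq : q x with _ | _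
    · rw [List.filter_cons, hq]
      simp only [Bool.false_eq_true, if_false]
      rw [← ih hcov']
      apply congrArg
      apply List.map_congr_left
      intro L _
      by_cases hfl : (f x == L) = true <;> simp [hfl, hq]
    · have hmem := hcov x (by simp)
      have ihe := ih hcov'
      rw [List.filter_cons, hq, if_pos rfl, List.length_cons]
      obtain ⟨pre, suf, hsplit, hpre, hsuf⟩ :
          ∃ pre suf, Ls = pre ++ f x :: suf ∧ f x ∉ pre ∧ f x ∉ suf := by
        obtain ⟨pre, suf, hs⟩ := List.append_of_mem hmem
        refine ⟨pre, suf, hs, ?_, ?_⟩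
        · rw [hs] at hnd
          have := List.nodup_append.mp hnd
          intro hp; exact this.2.2 (f x) hp (f x) (List.mem_cons_self ..) rfl
        · rw [hs] at hnd
          have := List.nodup_append.mp hnd
          exact (List.nodup_cons.mp this.2.1).1
      rw [hsplit] at ihe ⊢
      simp only [List.map_append, List.map_cons, List.sum_append, List.sum_cons] at ihe ⊢
      have hb : ∀ L ∈ pre ++ suf, (((x :: xs).filter (fun k => f k == L)).filter q).length
          = ((xs.filter (fun k => f k == L)).filter q).length := by
        intro L hL
        have hne : ¬ (f x == L) = true := by
          simp only [beq_iff_eq]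
          intro he
          rw [List.mem_append] at hL
          rcases hL with h | h
          · exact hpre (he ▸ h)
          · exact hsuf (he ▸ h)
        simp [hne]
      have hself : (((x :: xs).filter (fun k => f k == f x)).filter q).length
          = ((xs.filter (fun k => f k == f x)).filter q).length + 1 := by
        simp [hq]
      have hp : (pre.map (fun L => (((x :: xs).filter (fun k => f k == L)).filter q).length)).sum
          = (pre.map (fun L => ((xs.filter (fun k => f k == L)).filter q).length)).sum := by
        apply congrArg
        apply List.map_congr_left
        intro L hL; exact hb L (by simp [hL])
      have hs : (suf.map (fun L => (((x :: xs).filter (fun k => f k == L)).filter q).length)).sum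
          = (suf.map (fun L => ((xs.filter (fun k => f k == L)).filter q).length)).sum := by
        apply congrArg
        apply List.map_congr_left
        intro L hL; exact hb L (by simp [hL])
      rw [hp, hs, hself]
      omega

-- ===== VERDICT (by name: the statement is the Claim_ definition above) =====
theorem glossary_hits_py_spec : Claim_equal_glossary_hits_py := by
  intro text glossary _
  unfold Spec_glossary_hits_py glossary_hits_py glossary_hits_py_alt
  dsimp only
  set xs := PySem.Set.ofList (glossary.map Prod.fst) with hxs
  set low := PySem.Str.lower text with hlow
  set q : String → Bool := fun k => PySem.Chars.isIn k.toList low.toList with hq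
  set byLen := xs.foldl (fun d k => d.modify (PySem.Str.len k) [] (fun s => PySem.Set.add s k)) PySem.Dict.empty with hby
  have hnodxs : xs.Nodup := PySem.Set.nodup_ofList _
  have hkeys : byLen.keys = PySem.Set.ofList (xs.map PySem.Str.len) := by
    rw [hby, PySem.Dict.keys_foldl_modify_key]
    simp [PySem.Dict.keys_empty, PySem.Set.update, PySem.Set.ofList_eq_foldl]
  have hnodk : byLen.keys.Nodup := by
    rw [hkeys]; exact PySem.Set.nodup_ofList _
  have hbucket : ∀ L, byLen.getD L [] = xs.filter (fun k => PySem.Str.len k == L) := by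
    intro L
    rw [hby, getD_group PySem.Str.len xs PySem.Dict.empty L (by simp [PySem.Dict.getD_empty]) hnodxs]
    simp [PySem.Dict.getD_empty]
  have hitems : byLen.items = byLen.keys.map (fun L => (L, byLen.getD L [])) :=
    PySem.Dict.items_eq_map_keys byLen hnodk []
  rw [hitems]
  rw [PySem.List.foldl_add
    (g := fun it : Int × List String => ((PySem.Set.inter it.2
      (PySem.Set.ofList ((PySem.List.pyRange 0 (PySem.Str.len low - it.1 + 1) 1).map
        (fun i => PySem.Str.slice low (some i) (some (i + it.1)))))).length : Int))]
  rw [List.map_map, hkeys]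
  have hcount : ∀ L ∈ PySem.Set.ofList (xs.map PySem.Str.len),
      ((PySem.Set.inter (byLen.getD L [])
          (PySem.Set.ofList ((PySem.List.pyRange 0 (PySem.Str.len low - L + 1) 1).map
            (fun i => PySem.Str.slice low (some i) (some (i + L)))))).length : Int)
        = (((xs.filter (fun k => PySem.Str.len k == L)).filter q).length : Int) := by
    intro L _
    rw [hbucket]
    unfold PySem.Set.inter
    congr 2
    apply List.filter_congr
    intro k hk
    have hkL : PySem.Str.len k = L := by
      have := (List.mem_filter.mp hk).2
      simpa using this
    rw [PySem.Set.contains, List.contains_eq_mem]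
    rw [hq]
    beta_reduce
    by_cases hmem : k ∈ (PySem.List.pyRange 0 (PySem.Str.len low - L + 1) 1).map
        (fun i => PySem.Str.slice low (some i) (some (i + L)))
    · rw [decide_eq_true ((PySem.Set.mem_ofList _ _).mpr hmem)]
      rw [← hkL] at hmem
      exact ((mem_slices_iff low k).mp hmem).symm
    · rw [decide_eq_false (fun h => hmem ((PySem.Set.mem_ofList _ _).mp h))]
      rw [← hkL] at hmem
      rcases hI : PySem.Chars.isIn k.toList low.toList with _ | _
      · rfl
      · exact absurd ((mem_slices_iff low k).mpr hI) hmem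
  have hmap : (PySem.Set.ofList (xs.map PySem.Str.len)).map ((fun it : Int × List String =>
        ((PySem.Set.inter it.2 (PySem.Set.ofList ((PySem.List.pyRange 0 (PySem.Str.len low - it.1 + 1) 1).map
          (fun i => PySem.Str.slice low (some i) (some (i + it.1)))))).length : Int))
          ∘ (fun L => (L, byLen.getD L [])))
      = (PySem.Set.ofList (xs.map PySem.Str.len)).map
          (fun L => (((xs.filter (fun k => PySem.Str.len k == L)).filter q).length : Int)) :=
    List.map_congr_left (fun L hL => by simpa using hcount L hL)
  rw [hmap]
  have hpart := sum_partition xs (PySem.Set.ofList (xs.map PySem.Str.len)) q PySem.Str.len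
    (PySem.Set.nodup_ofList _)
    (fun k hk => (PySem.Set.mem_ofList _ _).mpr (List.mem_map_of_mem hk))
  by_cases hg : glossary = []
  · subst hg
    have : xs = [] := by rw [hxs]; rfl
    rw [if_pos rfl, this]
    simp
  · rw [if_neg hg, PySem.List.foldl_if_add_one, ← PySem.List.dedup_eq_ofList] at *
    rw [List.countP_eq_length_filter]
    have hqeq : (fun src => PySem.Str.isIn src low) = q := by
      funext s
      rw [hq, PySem.Str.isIn]
    rw [hqeq]
    congr 1
    rw [← hxs, ← hpart, Nat.cast_list_sum, List.map_map]
    rfl
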